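-- pv_equiv track=rewrite | github.com/1969-07-20/GoogleFoobarChallenge | OfflineTester/Level4_EscapePods/solution3.py | solution
-- ===== SOURCE A (Python) =====
-- def solution(entrances, exits, path):
--     le = len(entrances)
--     lp = len(path)
--     lx = len(exits)
--     bunn_count = 0
--     inter_paths = path[le:(lp-lx)]                # To find all intermediate rooms
--     for i in range(lp - le - lx):                 # Loop through range of length of intermediate rooms
--         sum_range = sum(inter_paths[i])           # Sum of an intermediate room's possible number of bunnies allowed
--         sum_enter = 0                             # Sum of bunnies that enter that room
--         for j in entrances:
--             sum_enter += path[j][le + i]          # Get all bunnies that enter a room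
--         bunn_count += min(sum_enter, sum_range)
--     return bunn_count
-- ===== SOURCE B (Python) =====
-- def solution(entrances, exits, path):
--     le, lp, lx = len(entrances), len(path), len(exits)
--     m = lp - le - lx
--     if m <= 0:
--         return 0
--     flow = [0] * m
--     for j in entrances:
--         flow = [f + r for f, r in zip(flow, path[j][le:lp - lx])]
--     return sum(min(f, sum(room)) for f, room in zip(flow, path[le:lp - lx]))
-- ===== Notes on version B (the rewrite author's own statement) =====
-- stated objective: alternative
-- what changed: Instead of A's room-outer loop that rescans all entrances per intermediate room, B accumulates the whole entering-flow vector by a single entrance-outer pass of elementwise vector additions over sliced rows, then sums min(flow, room capacity) in one zip pass.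
import Mathlib
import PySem

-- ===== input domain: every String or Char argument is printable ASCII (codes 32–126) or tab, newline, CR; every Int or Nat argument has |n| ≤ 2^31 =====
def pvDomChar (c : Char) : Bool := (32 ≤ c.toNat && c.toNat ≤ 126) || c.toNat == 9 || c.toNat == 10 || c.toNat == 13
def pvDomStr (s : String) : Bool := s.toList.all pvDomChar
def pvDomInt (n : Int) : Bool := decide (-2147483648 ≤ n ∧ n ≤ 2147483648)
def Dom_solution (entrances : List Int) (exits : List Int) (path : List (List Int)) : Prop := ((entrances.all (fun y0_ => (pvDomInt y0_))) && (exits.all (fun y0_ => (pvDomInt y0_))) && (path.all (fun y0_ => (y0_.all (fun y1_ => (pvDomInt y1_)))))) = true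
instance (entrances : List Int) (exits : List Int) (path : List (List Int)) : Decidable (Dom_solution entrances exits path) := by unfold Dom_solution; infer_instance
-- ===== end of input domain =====

-- B replaces A's room-outer double loop by an entrance-outer vector accumulation of the
-- entering flow followed by one zip pass over the intermediate rooms (alternative decomposition).

-- ===== PORT A =====
def solution (entrances : List Int) (exits : List Int) (path : List (List Int)) : Int :=
  let le : Int := entrances.length
  let lp : Int := path.length
  let lx : Int := exits.length
  let interPaths := PySem.List.slice path (some le) (some (lp - lx))
  (PySem.List.pyRange 0 (lp - le - lx) 1).foldl (fun bunnCount i =>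
    let sumRange := (PySem.List.pyGetD interPaths i []).foldl (· + ·) 0
    let sumEnter := entrances.foldl (fun s j =>
        s + PySem.List.pyGetD (PySem.List.pyGetD path j []) (le + i) 0) 0
    bunnCount + min sumEnter sumRange) 0

-- ===== PORT B =====
def solution_alt (entrances : List Int) (exits : List Int) (path : List (List Int)) : Int :=
  let le : Int := entrances.length
  let lp : Int := path.length
  let lx : Int := exits.length
  let m : Int := lp - le - lx
  if m ≤ 0 then 0
  else
    let flow0 : List Int := List.replicate m.toNat 0
    let flow := entrances.foldl (fun fl j =>
      (fl.zip (PySem.List.slice (PySem.List.pyGetD path j []) (some le) (some (lp - lx)))).map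
        (fun p => p.1 + p.2)) flow0
    (flow.zip (PySem.List.slice path (some le) (some (lp - lx)))).foldl
      (fun s p => s + min p.1 (p.2.foldl (· + ·) 0)) 0

-- ===== PRECONDITION & SPEC =====
-- Pre_ excludes exactly the inputs on which A raises IndexError: a nonempty intermediate
-- range together with an entrance that is an out-of-range index into path, or whose row
-- is shorter than lp - lx.
def Pre_solution (entrances : List Int) (exits : List Int) (path : List (List Int)) : Prop :=
  0 < (path.length : Int) - entrances.length - exits.length →
    ∀ j ∈ entrances, PySem.Raise.InRange path.length j ∧
      (path.length : Int) - exits.length ≤ ((PySem.List.pyGetD path j []).length : Int)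
instance (entrances : List Int) (exits : List Int) (path : List (List Int)) : Decidable (Pre_solution entrances exits path) := by unfold Pre_solution; infer_instance

def pvWitness_solution : List Int × List Int × List (List Int) :=
  ([0], [2], [[0, 1, 0], [0, 0, 1], [0, 0, 0]])

def Spec_solution (entrances : List Int) (exits : List Int) (path : List (List Int)) (out : Int) : Prop := out = solution_alt entrances exits path
instance (entrances : List Int) (exits : List Int) (path : List (List Int)) (out : Int) : Decidable (Spec_solution entrances exits path out) := by unfold Spec_solution; infer_instance

-- ===== CLAIM (what is proved, stated in full; the proofs are below) =====
def Claim_equal_solution : Prop := ∀ (entrances : List Int) (exits : List Int) (path : List (List Int)), Dom_solution entrances exits path → Pre_solution entrances exits path → Spec_solution entrances exits path (solution entrances exits path)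

-- ===== LEMMAS AND PROOFS =====

-- mapping over the zip of a range-indexed list with another list of the same length
lemma zip_map_range {β γ : Type} (n : Nat) (c : Nat → Int) (ys : List β) (d : β)
    (g : Int × β → γ) (h : ys.length = n) :
    (((List.range n).map c).zip ys).map g
      = (List.range n).map (fun k => g (c k, ys.getD k d)) := by
  apply List.ext_getElem
  · simp [h]
  · intro i h1 h2
    simp [h] at h1
    simp [List.getElem_zip, List.getD_eq_getElem?_getD, h ▸ h1]

-- the entrance-outer accumulation loop of B computes, per column k, the sum over
-- entrances of that entrance's flow into intermediate room k
lemma flow_spec (a b : Int) (ha : 0 ≤ a) (hab : a ≤ b) (path : List (List Int)) (es : List Int)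
    (hrows : ∀ j ∈ es, b ≤ ((PySem.List.pyGetD path j []).length : Int)) (c : Nat → Int) :
    es.foldl (fun fl j =>
      (fl.zip (PySem.List.slice (PySem.List.pyGetD path j []) (some a) (some b))).map
        (fun p => p.1 + p.2)) ((List.range (b - a).toNat).map c)
    = (List.range (b - a).toNat).map
        (fun k => c k + (es.map (fun j => PySem.List.pyGetD (PySem.List.pyGetD path j []) (a + (k : Int)) 0)).sum) := by
  induction es generalizing c with
  | nil => simp
  | cons j es ih =>
    simp only [List.foldl_cons]
    have hrow := hrows j (by simp)
    have hs : (PySem.List.slice (PySem.List.pyGetD path j []) (some a) (some b)).length = (b - a).toNat := by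
      rw [PySem.List.slice_toNat _ ha (le_trans ha hab)]
      simp
      omega
    rw [zip_map_range _ c _ (0:Int) _ hs, ih (fun j' hj' => hrows j' (List.mem_cons_of_mem _ hj'))]
    apply List.map_congr_left
    intro k hk
    simp only [List.mem_range] at hk
    have hget : (PySem.List.slice (PySem.List.pyGetD path j []) (some a) (some b)).getD k 0
        = PySem.List.pyGetD (PySem.List.pyGetD path j []) (a + (k : Int)) 0 := by
      rw [PySem.List.slice_toNat _ ha (le_trans ha hab)]
      rw [PySem.List.pyGetD_eq_getElem _ 0 (by omega) (by omega)]
      simp only [show (a + (k : Int)).toNat = a.toNat + k from by omega]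
      rw [List.getD_eq_getElem?_getD]
      rw [List.getElem?_take, List.getElem?_drop]
      rw [if_pos (by omega), List.getElem?_eq_getElem (by omega), Option.getD_some]
    rw [hget]
    simp [add_assoc]

-- ===== VERDICT (by name: the statement is the Claim_ definition above) =====
theorem solution_spec : Claim_equal_solution := by
  intro entrances exits path _ hpre
  unfold Spec_solution
  simp only [solution, solution_alt]
  by_cases hm : (path.length : Int) - entrances.length - exits.length ≤ 0
  · rw [PySem.List.pyRange_one_eq_nil hm, if_pos hm]
    simp
  · rw [not_le] at hm
    specialize hpre hm
    rw [if_neg (by omega)]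
    have hS : (PySem.List.slice path (some (entrances.length : Int)) (some ((path.length : Int) - exits.length))).length
        = (((path.length : Int) - exits.length) - entrances.length).toNat := by
      rw [PySem.List.slice_toNat _ (by positivity) (by omega)]
      simp
      omega
    rw [show (List.replicate ((path.length : Int) - ↑entrances.length - ↑exits.length).toNat (0 : Int))
        = (List.range (((path.length : Int) - ↑exits.length) - ↑entrances.length).toNat).map (fun _ => (0 : Int)) from by
      rw [List.map_const', List.length_range]
      congr 1
      omega]
    rw [flow_spec (entrances.length : Int) ((path.length : Int) - exits.length) (by positivity) (by omega)
      path entrances (fun j hj => (hpre j hj).2) (fun _ => 0)]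
    rw [PySem.List.pyRange_one, List.foldl_map, PySem.List.foldl_add]
    rw [PySem.List.foldl_add, zip_map_range _ _ _ ([] : List Int) _ hS]
    simp only [zero_add, sub_zero]
    rw [show ((path.length : Int) - ↑entrances.length - ↑exits.length).toNat
        = (((path.length : Int) - ↑exits.length) - ↑entrances.length).toNat from by omega]
    apply congrArg List.sum
    apply List.map_congr_left
    intro k hk
    simp [PySem.List.foldl_add, PySem.List.pyGetD_natCast]
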